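-- pv_equiv track=rewrite | github.com/kjcolley7/CTF-WriteUps | 2019/watevr/Hjarnknull/asm.py | resolve_labels
-- ===== SOURCE A (Python) =====
-- def resolve_labels(asm, showAddrs=False):
-- 	labels = {}
-- 	insns = []
--
-- 	ip = 0
-- 	for item in asm:
-- 		if item.startswith("label "):
-- 			labels[item[len("label "):]] = ip
-- 		else:
-- 			ip += 1
--
-- 	ip = 0
-- 	for item in asm:
-- 		if not item.startswith("label "):
-- 			if showAddrs:
-- 				prefix = "%d: " % ip
-- 			else:
-- 				prefix = ""
--
-- 			if "@" in item:
-- 				mnemonic, label = item.split("@")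
-- 				insns.append(prefix + mnemonic + str(labels[label]))
-- 			else:
-- 				insns.append(prefix + item)
--
-- 			ip += 1
--
-- 	return insns
-- ===== SOURCE B (Python) =====
-- def resolve_labels(asm, showAddrs=False):
--     labels = {}
--     insns = []
--     pending = []
--     for item in asm:
--         if item.startswith("label "):
--             labels[item[len("label "):]] = len(insns)
--         else:
--             prefix = "%d: " % len(insns) if showAddrs else ""
--             if "@" in item:
--                 mnemonic, label = item.split("@")
--                 pending.append((len(insns), prefix + mnemonic, label))
--                 insns.append("")
--             else:
--                 insns.append(prefix + item)
--     for pos, head, label in pending: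
--         insns[pos] = head + str(labels[label])
--     return insns
-- ===== Notes on version B (the rewrite author's own statement) =====
-- stated objective: alternative
-- what changed: Single pass over asm that emits instructions immediately (using len(insns) as the running address) and records unresolved label references in a pending list, followed by a backpatch loop over only the pending entries, instead of A's two full scans of asm; Pre_ excludes inputs where A raises (a non-label item with more or fewer than one '@'-separated field beyond the mnemonic, i.e. two or more '@', or an '@'-reference to a label never defined), on which both implementations raise.
import Mathlib
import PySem

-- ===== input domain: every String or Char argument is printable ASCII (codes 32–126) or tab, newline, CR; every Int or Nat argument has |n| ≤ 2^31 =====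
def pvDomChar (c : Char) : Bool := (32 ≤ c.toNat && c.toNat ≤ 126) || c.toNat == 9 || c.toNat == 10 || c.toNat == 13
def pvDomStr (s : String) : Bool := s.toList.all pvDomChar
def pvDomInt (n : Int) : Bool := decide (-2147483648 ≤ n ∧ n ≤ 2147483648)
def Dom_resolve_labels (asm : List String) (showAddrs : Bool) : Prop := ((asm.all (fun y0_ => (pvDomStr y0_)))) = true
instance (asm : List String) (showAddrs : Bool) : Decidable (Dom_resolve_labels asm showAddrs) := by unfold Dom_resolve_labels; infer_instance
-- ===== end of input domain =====

-- B is an alternative single-pass decomposition (emit + backpatch) of A's two-scan assembler; return values agree on Pre_.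

-- ===== PORT A =====
-- first loop body: collect label addresses, counting non-label items
def stepA1 (s : PySem.Dict String Int × Int) (item : String) : PySem.Dict String Int × Int :=
  if PySem.Str.startswith item "label " = true then
    (s.1.insert (PySem.Str.slice item (some 6) none) s.2, s.2)
  else
    (s.1, s.2 + 1)

-- second loop body: emit each non-label instruction, resolving "@label" via the labels dict
-- (labels[label] on a missing key is Python's KeyError, and a split("@") with ≠ 2 parts is a
--  ValueError: both excluded by Pre_; the port reads parts/dict with a default there)
def stepA2 (showAddrs : Bool) (labels : PySem.Dict String Int)
    (s : List String × Int) (item : String) : List String × Int :=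
  if ¬ (PySem.Str.startswith item "label " = true) then
    let pre := if showAddrs then PySem.Int.toStr s.2 ++ ": " else ""
    if PySem.Str.isIn "@" item = true then
      let parts := (PySem.Str.split? item "@").getD []
      (s.1 ++ [pre ++ parts.getD 0 "" ++ PySem.Int.toStr (labels.getD (parts.getD 1 "") 0)], s.2 + 1)
    else
      (s.1 ++ [pre ++ item], s.2 + 1)
  else s

def resolve_labels (asm : List String) (showAddrs : Bool) : List String :=
  let labels := (asm.foldl stepA1 (PySem.Dict.empty, 0)).1
  (asm.foldl (stepA2 showAddrs labels) ([], 0)).1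

-- ===== PORT B =====
-- single-pass loop body: state is (labels, insns, pending); the current address is insns.length
def stepB (showAddrs : Bool)
    (s : PySem.Dict String Int × List String × List (Nat × String × String)) (item : String) :
    PySem.Dict String Int × List String × List (Nat × String × String) :=
  if PySem.Str.startswith item "label " = true then
    (s.1.insert (PySem.Str.slice item (some 6) none) (s.2.1.length : Int), s.2.1, s.2.2)
  else
    let pre := if showAddrs then PySem.Int.toStr (s.2.1.length : Int) ++ ": " else ""
    if PySem.Str.isIn "@" item = true then
      let parts := (PySem.Str.split? item "@").getD []
      (s.1, s.2.1 ++ [""], s.2.2 ++ [(s.2.1.length, pre ++ parts.getD 0 "", parts.getD 1 "")])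
    else
      (s.1, s.2.1 ++ [pre ++ item], s.2.2)

-- backpatch phase: each recorded position gets head + str(labels[label]);
-- (insns[pos] = v is exact as List.set: every recorded pos is a former length, always in range)
def patchB (labels : PySem.Dict String Int) (insns : List String)
    (pending : List (Nat × String × String)) : List String :=
  pending.foldl (fun acc p => acc.set p.1 (p.2.1 ++ PySem.Int.toStr (labels.getD p.2.2 0))) insns

def resolve_labels_alt (asm : List String) (showAddrs : Bool) : List String :=
  let st := asm.foldl (stepB showAddrs) (PySem.Dict.empty, [], [])
  patchB st.1 st.2.1 st.2.2

-- ===== PRECONDITION & SPEC =====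
-- the label names defined in asm (keys of the labels dict)
def labelDefs (asm : List String) : List String :=
  asm.filterMap (fun s =>
    if PySem.Str.startswith s "label " = true then some (PySem.Str.slice s (some 6) none) else none)

-- Pre_ excludes exactly the inputs on which the Python A raises: a non-label item with two or
-- more '@' (ValueError from unpacking split("@")) or whose single '@'-reference names a label
-- never defined (KeyError); B raises on exactly the same inputs.
def Pre_resolve_labels (asm : List String) (showAddrs : Bool) : Prop :=
  ∀ item ∈ asm, PySem.Str.startswith item "label " = false →
    PySem.Str.isIn "@" item = true →
      PySem.Str.count item "@" = 1 ∧
        ((PySem.Str.split? item "@").getD []).getD 1 "" ∈ labelDefs asm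
instance (asm : List String) (showAddrs : Bool) : Decidable (Pre_resolve_labels asm showAddrs) := by
  unfold Pre_resolve_labels; infer_instance

def pvWitness_resolve_labels : List String × Bool := (["label start", "jmp@start", "nop"], true)

def Spec_resolve_labels (asm : List String) (showAddrs : Bool) (out : List String) : Prop :=
  out = resolve_labels_alt asm showAddrs
instance (asm : List String) (showAddrs : Bool) (out : List String) :
    Decidable (Spec_resolve_labels asm showAddrs out) := by unfold Spec_resolve_labels; infer_instance

-- ===== CLAIM (what is proved, stated in full; the proofs are below) =====
def Claim_equal_resolve_labels : Prop := ∀ (asm : List String) (showAddrs : Bool), Dom_resolve_labels asm showAddrs → Pre_resolve_labels asm showAddrs → Spec_resolve_labels asm showAddrs (resolve_labels asm showAddrs)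

-- ===== LEMMAS AND PROOFS =====

theorem patchB_length (L : PySem.Dict String Int) (insns : List String)
    (pending : List (Nat × String × String)) : (patchB L insns pending).length = insns.length := by
  induction pending generalizing insns with
  | nil => rfl
  | cons p rest ih => simp [patchB, List.foldl_cons] at ih ⊢; rw [ih, List.length_set]

theorem patchB_append (L : PySem.Dict String Int) (insns : List String)
    (pending : List (Nat × String × String)) (x : String)
    (h : ∀ p ∈ pending, p.1 < insns.length) :
    patchB L (insns ++ [x]) pending = patchB L insns pending ++ [x] := by
  induction pending generalizing insns with
  | nil => rfl
  | cons p rest ih =>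
    simp only [patchB, List.foldl_cons] at ih ⊢
    rw [List.set_append_left _ _ (h p (by simp))]
    exact ih _ (fun q hq => by rw [List.length_set]; exact h q (by simp [hq]))

theorem set_append_length (l : List String) (x v : String) :
    (l ++ [x]).set l.length v = l ++ [v] := by
  induction l with
  | nil => rfl
  | cons a t ih => simp [ih]

theorem labels_eq (showAddrs : Bool) (asm : List String) :
    ∀ (labels : PySem.Dict String Int) (insns : List String)
      (pending : List (Nat × String × String)) (ip : Int), ip = (insns.length : Int) →
      (asm.foldl (stepB showAddrs) (labels, insns, pending)).1 =
        (asm.foldl stepA1 (labels, ip)).1 := by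
  induction asm with
  | nil => intro _ _ _ _ _; rfl
  | cons item rest ih =>
    intro labels insns pending ip hip
    by_cases h1 : PySem.Str.startswith item "label " = true
    · simp only [List.foldl_cons, stepB, stepA1, h1, if_pos, ← hip]
      exact ih _ _ _ _ hip
    · simp only [List.foldl_cons, stepB, stepA1, h1, Bool.false_eq_true, reduceIte]
      by_cases h2 : PySem.Str.isIn "@" item = true
      · simp only [h2, reduceIte]
        exact ih _ _ _ _ (by simp [hip])
      · simp only [h2, Bool.false_eq_true, reduceIte]
        exact ih _ _ _ _ (by simp [hip])

theorem patchB_snoc (L : PySem.Dict String Int) (insns : List String)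
    (pending : List (Nat × String × String)) (hd lbl : String)
    (hb : ∀ p ∈ pending, p.1 < insns.length) :
    patchB L (insns ++ [""]) (pending ++ [(insns.length, hd, lbl)]) =
      patchB L insns pending ++ [hd ++ PySem.Int.toStr (L.getD lbl 0)] := by
  have h1 : patchB L (insns ++ [""]) pending = patchB L insns pending ++ [""] :=
    patchB_append L insns pending "" hb
  have h2 : (patchB L insns pending).length = insns.length := patchB_length L insns pending
  unfold patchB at h1 h2 ⊢
  simp only [List.foldl_append, List.foldl_cons, List.foldl_nil]
  rw [h1, ← h2, set_append_length]

theorem main_eq (showAddrs : Bool) (L : PySem.Dict String Int) (asm : List String) :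
    ∀ (labels : PySem.Dict String Int) (insns : List String)
      (pending : List (Nat × String × String)) (ip : Int),
      (∀ p ∈ pending, p.1 < insns.length) → ip = (insns.length : Int) →
      patchB L (asm.foldl (stepB showAddrs) (labels, insns, pending)).2.1
               (asm.foldl (stepB showAddrs) (labels, insns, pending)).2.2 =
        (asm.foldl (stepA2 showAddrs L) (patchB L insns pending, ip)).1 := by
  induction asm with
  | nil => intro _ _ _ _ _ _; rfl
  | cons item rest ih =>
    intro labels insns pending ip hb hip
    have hlen : ∀ x : String, (((insns ++ [x]).length : Nat) : Int) = (insns.length : Int) + 1 := by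
      intro x; push_cast [List.length_append, List.length_singleton]; ring
    by_cases h1 : PySem.Str.startswith item "label " = true
    · simp only [List.foldl_cons, stepB, stepA2, h1, reduceIte, not_true_eq_false]
      exact ih _ _ _ _ hb hip
    · simp only [List.foldl_cons, stepB, stepA2, h1, reduceIte, Bool.false_eq_true,
        not_false_eq_true]
      rw [hip]
      by_cases h2 : PySem.Str.isIn "@" item = true
      · simp only [h2, reduceIte]
        have hb' : ∀ p ∈ pending ++
            [(insns.length,
              (if showAddrs then PySem.Int.toStr (insns.length : Int) ++ ": " else "") ++
                (((PySem.Str.split? item "@").getD []).getD 0 ""),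
              ((PySem.Str.split? item "@").getD []).getD 1 "")],
            p.1 < (insns ++ [""]).length := by
          intro p hp
          simp only [List.mem_append, List.mem_singleton] at hp
          rcases hp with hp | hp
          · have := hb p hp; simp only [List.length_append, List.length_singleton]; omega
          · subst hp; simp
        rw [ih _ _ _ _ hb' rfl, patchB_snoc L insns pending _ _ hb, hlen]
      · simp only [h2, Bool.false_eq_true, reduceIte]
        have hb' : ∀ p ∈ pending, p.1 < (insns ++
            [(if showAddrs then PySem.Int.toStr (insns.length : Int) ++ ": " else "") ++ item]).length := by
          intro p hp
          have := hb p hp; simp only [List.length_append, List.length_singleton]; omega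
        rw [ih _ _ _ _ hb' rfl, patchB_append L insns pending _ hb, hlen]

-- ===== VERDICT (by name: the statement is the Claim_ definition above) =====
theorem resolve_labels_spec : Claim_equal_resolve_labels := by
  intro asm showAddrs _ _
  unfold Spec_resolve_labels
  have hlab := labels_eq showAddrs asm PySem.Dict.empty [] [] 0 (by simp)
  have hmain := main_eq showAddrs
    ((asm.foldl (stepB showAddrs) (PySem.Dict.empty, [], [])).1) asm
    PySem.Dict.empty [] [] 0 (by simp) (by simp)
  have e1 : resolve_labels asm showAddrs =
      (asm.foldl (stepA2 showAddrs ((asm.foldl stepA1 (PySem.Dict.empty, 0)).1)) ([], 0)).1 := rfl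
  have e2 : resolve_labels_alt asm showAddrs =
      patchB (asm.foldl (stepB showAddrs) (PySem.Dict.empty, [], [])).1
             (asm.foldl (stepB showAddrs) (PySem.Dict.empty, [], [])).2.1
             (asm.foldl (stepB showAddrs) (PySem.Dict.empty, [], [])).2.2 := rfl
  rw [e1, e2, ← hlab]
  exact hmain.symm
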